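-- pv_equiv track=rewrite | github.com/jbarry1990/AdventOfCode | Day 13/Puzzle13a.py | DetermineBus
-- ===== SOURCE A (Python) =====
-- def DetermineBus(Schedule):
--     ArrivalTime = int(Schedule[0])
--     ActiveBuses = [int(ActiveBus) for ActiveBus in Schedule[1].split(",") if ActiveBus != "x"]
--     ActiveBuses.sort()
--     BestBus = []
--     EarliestTime = ActiveBuses[0] - (ArrivalTime % ActiveBuses[0])
--     for Bus in ActiveBuses:
--
--         RemainingMinutes = Bus - (ArrivalTime % Bus)
--
--         if RemainingMinutes <= EarliestTime:
--             if not BestBus: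
--                 BestBus.append(Bus)
--                 BestBus.append(RemainingMinutes)
--             else:
--                 BestBus[0] = Bus
--                 BestBus[1] = RemainingMinutes
--     return BestBus
-- ===== SOURCE B (Python) =====
-- def DetermineBus(Schedule):
--     t = int(Schedule[0])
--     buses = []
--     for tok in Schedule[1].split(","):
--         if tok != "x":
--             buses.append(int(tok))
--     s = buses[0]
--     for b in buses:
--         if b < s:
--             s = b
--     limit = s - t % s
--     best = None
--     for b in buses:
--         if b - t % b <= limit and (best is None or b > best):
--             best = b
--     return [best, best - t % best]
-- ===== Notes on version B (the rewrite author's own statement) =====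
-- stated objective: alternative
-- what changed: Removed the sort and the last-match list-rewriting accumulator: B builds the bus list in one token loop, computes the wait threshold with a running-minimum pass, and picks the answer with a running-best pass keeping the largest bus whose wait is within the threshold.
import Mathlib
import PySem

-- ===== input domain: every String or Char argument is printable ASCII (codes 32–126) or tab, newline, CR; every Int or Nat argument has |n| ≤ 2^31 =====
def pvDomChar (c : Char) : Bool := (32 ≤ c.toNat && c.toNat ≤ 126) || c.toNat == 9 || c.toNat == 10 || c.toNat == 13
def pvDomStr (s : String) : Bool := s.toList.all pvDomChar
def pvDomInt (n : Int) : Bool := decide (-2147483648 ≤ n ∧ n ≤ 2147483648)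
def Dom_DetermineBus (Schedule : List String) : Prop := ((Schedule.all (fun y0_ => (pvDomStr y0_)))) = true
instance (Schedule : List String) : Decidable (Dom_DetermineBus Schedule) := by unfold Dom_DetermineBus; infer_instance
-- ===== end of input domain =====

-- B drops A's sort and its stateful last-match list rewriting: one token pass builds the bus list,
-- a running-minimum pass fixes the wait threshold, and a running-best pass keeps the largest bus
-- within the threshold — objective: alternative decomposition, no sort.

-- ===== PORT A =====
def DetermineBus (Schedule : List String) : List Int :=
  let ArrivalTime : Int := (PySem.Int.ofStr? (PySem.List.pyGetD Schedule 0 "")).getD 0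
  let ActiveBuses : List Int :=
    (((PySem.Str.split? (PySem.List.pyGetD Schedule 1 "") ",").getD []).filter (fun t => t ≠ "x")).map
      (fun t => (PySem.Int.ofStr? t).getD 0)
  let ActiveBuses := PySem.List.sorted ActiveBuses (fun x => x)
  let EarliestTime : Int :=
    PySem.List.pyGetD ActiveBuses 0 0 - PySem.Int.mod ArrivalTime (PySem.List.pyGetD ActiveBuses 0 0)
  ActiveBuses.foldl (fun BestBus Bus =>
    let RemainingMinutes := Bus - PySem.Int.mod ArrivalTime Bus
    if RemainingMinutes ≤ EarliestTime then
      if BestBus.isEmpty then [Bus, RemainingMinutes]   -- append, append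
      else [Bus, RemainingMinutes]                      -- BestBus[0] = Bus; BestBus[1] = RemainingMinutes
    else BestBus) []

-- ===== PORT B =====
def DetermineBus_alt (Schedule : List String) : List Int :=
  let t : Int := (PySem.Int.ofStr? (PySem.List.pyGetD Schedule 0 "")).getD 0
  -- for tok in Schedule[1].split(","): if tok != "x": buses.append(int(tok))
  let buses : List Int :=
    ((PySem.Str.split? (PySem.List.pyGetD Schedule 1 "") ",").getD []).foldl
      (fun acc tok => if tok ≠ "x" then acc ++ [(PySem.Int.ofStr? tok).getD 0] else acc) []
  -- s = buses[0]; for b in buses: if b < s: s = b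
  let s : Int := buses.foldl (fun s b => if b < s then b else s) (PySem.List.pyGetD buses 0 0)
  let limit : Int := s - PySem.Int.mod t s
  -- best = None; for b in buses: if b - t % b <= limit and (best is None or b > best): best = b
  let best : Option Int := buses.foldl
    (fun best b =>
      if b - PySem.Int.mod t b ≤ limit ∧ (best = none ∨ b > best.getD 0) then some b else best)
    none
  let bv : Int := best.getD 0
  [bv, bv - PySem.Int.mod t bv]

-- ===== PRECONDITION & SPEC =====
-- the tokens of Schedule[1] that are not "x" (used only by Pre_)
def pvToks (Schedule : List String) : List String :=
  ((PySem.Str.split? (PySem.List.pyGetD Schedule 1 "") ",").getD []).filter (fun t => t ≠ "x")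

-- Pre_ excludes exactly the inputs where Python A raises: fewer than two schedule entries
-- (IndexError), Schedule[0] not an int literal (ValueError), a non-"x" token that is not an int
-- literal (ValueError) or parses to 0 (ZeroDivisionError), and no non-"x" token at all (IndexError).
def Pre_DetermineBus (Schedule : List String) : Prop :=
  2 ≤ Schedule.length ∧
  (PySem.Int.ofStr? (PySem.List.pyGetD Schedule 0 "")).isSome = true ∧
  pvToks Schedule ≠ [] ∧
  (pvToks Schedule).all (fun t => (PySem.Int.ofStr? t).getD 0 ≠ 0) = true
instance (Schedule : List String) : Decidable (Pre_DetermineBus Schedule) := by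
  unfold Pre_DetermineBus; infer_instance

def pvWitness_DetermineBus : List String := ["939", "7,13,x,x,59,x,31,19"]

def Spec_DetermineBus (Schedule : List String) (out : List Int) : Prop := out = DetermineBus_alt Schedule
instance (Schedule : List String) (out : List Int) : Decidable (Spec_DetermineBus Schedule out) := by unfold Spec_DetermineBus; infer_instance

-- ===== CLAIM (what is proved, stated in full; the proofs are below) =====
def Claim_equal_DetermineBus : Prop := ∀ (Schedule : List String), Dom_DetermineBus Schedule → Pre_DetermineBus Schedule → Spec_DetermineBus Schedule (DetermineBus Schedule)

-- ===== LEMMAS AND PROOFS =====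

-- A's loop keeps the LAST element passing the test: it equals the last element of the filter.
theorem foldl_keep_last {α β : Type} (P : α → Prop) [DecidablePred P] (g : α → β) :
    ∀ (l : List α) (init : β),
      l.foldl (fun acc b => if P b then g b else acc) init =
        (match (l.filter (fun b => decide (P b))).getLast? with
         | none => init
         | some b => g b) := by
  intro l
  induction l with
  | nil => intro init; rfl
  | cons x t ih =>
    intro init
    simp only [List.foldl_cons, List.filter_cons]
    by_cases hx : P x
    · simp only [hx, ih]
      cases h : (t.filter P).getLast? with
      | none =>
        have : t.filter P = [] := List.getLast?_eq_none_iff.mp h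
        simp [this, List.getLast?_singleton]
      | some b => simp [List.getLast?_cons, h]
    · simp [hx, ih]

-- last element of a (· ≤ ·)-pairwise list bounds every element
theorem getLast?_isMax {l : List Int} {b : Int}
    (hp : l.Pairwise (fun a b => a ≤ b)) (hb : l.getLast? = some b) :
    ∀ y ∈ l, y ≤ b := by
  induction l with
  | nil => simp at hb
  | cons x t ih =>
    intro y hy
    cases t with
    | nil =>
      simp at hb hy; omega
    | cons z u =>
      have hp' := List.pairwise_cons.mp hp
      rw [List.getLast?_cons_cons] at hb
      have hbmem : b ∈ z :: u := List.mem_of_getLast? hb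
      rcases List.mem_cons.mp hy with rfl | hy'
      · exact le_trans (hp'.1 b hbmem) le_rfl
      · exact ih hp'.2 hb y hy'

-- B's running-minimum loop: the result is below the seed and every element, and is one of them.
theorem minfold_spec :
    ∀ (l : List Int) (s0 : Int),
      (l.foldl (fun s b => if b < s then b else s) s0 = s0 ∨
        l.foldl (fun s b => if b < s then b else s) s0 ∈ l) ∧
      l.foldl (fun s b => if b < s then b else s) s0 ≤ s0 ∧
      (∀ y ∈ l, l.foldl (fun s b => if b < s then b else s) s0 ≤ y) := by
  intro l
  induction l with
  | nil => intro s0; simp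
  | cons x t ih =>
    intro s0
    simp only [List.foldl_cons]
    by_cases hx : x < s0
    · simp only [if_pos hx]
      obtain ⟨hmem, hle, hall⟩ := ih x
      refine ⟨?_, by omega, ?_⟩
      · rcases hmem with h | h
        · exact Or.inr (by simp [h])
        · exact Or.inr (List.mem_cons_of_mem _ h)
      · intro y hy
        rcases List.mem_cons.mp hy with rfl | hy'
        · omega
        · exact hall y hy'
    · simp only [if_neg hx]
      obtain ⟨hmem, hle, hall⟩ := ih s0
      refine ⟨?_, hle, ?_⟩
      · rcases hmem with h | h
        · exact Or.inl h
        · exact Or.inr (List.mem_cons_of_mem _ h)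
      · intro y hy
        rcases List.mem_cons.mp hy with rfl | hy'
        · omega
        · exact hall y hy'

-- B's running-best loop: if it ends on `some w`, w passes (or was the seed), dominates the seed
-- and every passing element; if it ends on `none`, nothing passed and the seed was `none`.
theorem bestfold_spec (P : Int → Prop) [DecidablePred P] :
    ∀ (l : List Int) (acc : Option Int),
      (l.foldl (fun best b => if P b ∧ (best = none ∨ b > best.getD 0) then some b else best) acc
          = none → acc = none ∧ ∀ y ∈ l, ¬ P y) ∧
      (∀ w, l.foldl (fun best b => if P b ∧ (best = none ∨ b > best.getD 0) then some b else best) acc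
          = some w →
        (acc = some w ∨ (P w ∧ w ∈ l)) ∧ (∀ v, acc = some v → v ≤ w) ∧
        (∀ y ∈ l, P y → y ≤ w)) := by
  intro l
  induction l with
  | nil =>
    intro acc
    refine ⟨by simp, ?_⟩
    intro w hw
    simp at hw
    exact ⟨Or.inl hw, by intro v hv; rw [hv] at hw; simp at hw; omega, by simp⟩
  | cons x t ih =>
    intro acc
    simp only [List.foldl_cons]
    by_cases hc : P x ∧ (acc = none ∨ x > acc.getD 0)
    · simp only [if_pos hc]
      obtain ⟨ihn, ihs⟩ := ih (some x)
      constructor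
      · intro h; exact absurd ((ihn h).1) (by simp)
      · intro w hw
        obtain ⟨hmem, hseed, hall⟩ := ihs w hw
        refine ⟨?_, ?_, ?_⟩
        · rcases hmem with h | h
          · cases h
            exact Or.inr ⟨hc.1, List.mem_cons_self⟩
          · exact Or.inr ⟨h.1, List.mem_cons_of_mem _ h.2⟩
        · intro v hv
          have hxw : x ≤ w := hseed x rfl
          rcases hc.2 with h | h
          · rw [hv] at h; cases h
          · rw [hv] at h; simp at h; omega
        · intro y hy hPy
          rcases List.mem_cons.mp hy with rfl | hy'
          · exact hseed y rfl
          · exact hall y hy' hPy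
    · simp only [if_neg hc]
      obtain ⟨ihn, ihs⟩ := ih acc
      constructor
      · intro h
        obtain ⟨h1, h2⟩ := ihn h
        refine ⟨h1, ?_⟩
        intro y hy
        rcases List.mem_cons.mp hy with rfl | hy'
        · intro hPy; exact hc ⟨hPy, Or.inl h1⟩
        · exact h2 y hy'
      · intro w hw
        obtain ⟨hmem, hseed, hall⟩ := ihs w hw
        refine ⟨?_, hseed, ?_⟩
        · rcases hmem with h | h
          · exact Or.inl h
          · exact Or.inr ⟨h.1, List.mem_cons_of_mem _ h.2⟩
        · intro y hy hPy
          rcases List.mem_cons.mp hy with rfl | hy'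
          · -- x did not update: either ¬P x (contradiction) or x ≤ acc ≤ w
            by_cases ha : acc = none
            · exact absurd ⟨hPy, Or.inl ha⟩ hc
            · obtain ⟨v, hv⟩ := Option.ne_none_iff_exists'.mp ha
              have hxv : ¬ y > v := fun hgt => hc ⟨hPy, Or.inr (by simp [hv, hgt])⟩
              have := hseed v hv
              omega
          · exact hall y hy' hPy

theorem DetermineBus_eq_alt (Schedule : List String)
    (hpre : Pre_DetermineBus Schedule) :
    DetermineBus Schedule = DetermineBus_alt Schedule := by
  obtain ⟨hlen, harr, hne, hall0⟩ := hpre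
  simp only [DetermineBus, DetermineBus_alt]
  set arr : Int := (PySem.Int.ofStr? (PySem.List.pyGetD Schedule 0 "")).getD 0 with harrdef
  set L : List Int :=
    (((PySem.Str.split? (PySem.List.pyGetD Schedule 1 "") ",").getD []).filter (fun t => t ≠ "x")).map
      (fun t => (PySem.Int.ofStr? t).getD 0) with hLdef
  -- B's append loop builds the same list L
  have hbuses :
      ((PySem.Str.split? (PySem.List.pyGetD Schedule 1 "") ",").getD []).foldl
        (fun acc tok => if tok ≠ "x" then acc ++ [(PySem.Int.ofStr? tok).getD 0] else acc) [] = L := by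
    rw [hLdef]
    simpa using PySem.List.foldl_append_if (fun t => decide (t ≠ "x"))
      (fun t => (PySem.Int.ofStr? t).getD 0)
      ((PySem.Str.split? (PySem.List.pyGetD Schedule 1 "") ",").getD []) []
  rw [hbuses]
  have hLne : L ≠ [] := by
    intro h
    apply hne
    have : pvToks Schedule = [] := by
      unfold pvToks
      exact List.map_eq_nil_iff.mp (hLdef ▸ h)
    exact this
  -- A's sorted list
  set S : List Int := PySem.List.sorted L (fun x => x) with hSdef
  have hSne : S ≠ [] := by
    rw [hSdef]
    simpa [PySem.List.sorted_eq_nil_iff] using hLne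
  obtain ⟨m, tS, hS⟩ := List.exists_cons_of_ne_nil hSne
  have hperm : S.Perm L := PySem.List.sorted_perm L (fun x => x) false
  have hmmem : m ∈ L := hperm.mem_iff.mp (hS ▸ List.mem_cons_self)
  have hmin : ∀ y ∈ L, m ≤ y := by
    have := PySem.List.key_head_sorted_le (xs := L) (key := fun x => x) (hSdef ▸ hS)
    simpa using this
  have hhead : PySem.List.pyGetD S 0 0 = m := by rw [hS]; exact PySem.List.pyGetD_zero_cons m tS 0
  -- B's running minimum s equals m
  set s : Int := L.foldl (fun s b => if b < s then b else s) (PySem.List.pyGetD L 0 0) with hsdef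
  have hs0mem : PySem.List.pyGetD L 0 0 ∈ L := by
    obtain ⟨h0, t0, hL0⟩ := List.exists_cons_of_ne_nil hLne
    rw [hL0, PySem.List.pyGetD_zero_cons]
    exact List.mem_cons_self
  obtain ⟨hsmem, hsle, hsall⟩ := minfold_spec L (PySem.List.pyGetD L 0 0)
  have hsmem' : s ∈ L := by
    rcases hsmem with h | h
    · rw [hsdef, h]; exact hs0mem
    · exact h
  have hsm : s = m := le_antisymm (hsall m hmmem) (hmin s hsmem')
  rw [hhead, hsm]
  simp only [ite_self]
  set E : Int := m - PySem.Int.mod arr m with hEdef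
  -- A's fold = last passing element of the sorted list
  rw [foldl_keep_last (fun b => b - PySem.Int.mod arr b ≤ E)
        (fun b => [b, b - PySem.Int.mod arr b]) S []]
  set P : Int → Bool := fun b => decide (b - PySem.Int.mod arr b ≤ E) with hPdef
  have hfilne : S.filter P ≠ [] := by
    have hPm : P m = true := by simp [hPdef, hEdef]
    rw [hS]
    simp [hPm]
  obtain ⟨b, hb⟩ := Option.isSome_iff_exists.mp
    (by simpa [Option.isSome_iff_ne_none, List.getLast?_eq_none_iff] using hfilne :
      (S.filter P).getLast?.isSome = true)
  have hSp : S.Pairwise (fun a b => a ≤ b) := by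
    have := PySem.List.sorted_pairwise L (fun x => x)
    simpa [hSdef] using this
  have hbmax : ∀ y ∈ S.filter P, y ≤ b := getLast?_isMax (hSp.filter P) hb
  have hbmem : b ∈ S.filter P := List.mem_of_getLast? hb
  have hbL : b ∈ L := hperm.mem_iff.mp (List.mem_of_mem_filter hbmem)
  have hbP : b - PySem.Int.mod arr b ≤ E := by
    have := List.of_mem_filter hbmem
    simpa [hPdef] using this
  -- B's running best
  obtain ⟨hbn, hbs⟩ := bestfold_spec (fun y => y - PySem.Int.mod arr y ≤ E) L none
  cases hres : L.foldl
      (fun best b => if b - PySem.Int.mod arr b ≤ E ∧ (best = none ∨ b > best.getD 0)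
        then some b else best) none with
  | none =>
    have hnm : ¬ (m - PySem.Int.mod arr m ≤ E) := (hbn hres).2 m hmmem
    exact absurd (by omega) hnm
  | some w =>
    obtain ⟨hwmem, _, hwall⟩ := hbs w hres
    have hw : w - PySem.Int.mod arr w ≤ E ∧ w ∈ L := by
      rcases hwmem with h | h
      · cases h
      · exact h
    have hwb : w ≤ b := by
      have : w ∈ S.filter P := by
        rw [List.mem_filter]
        exact ⟨hperm.mem_iff.mpr hw.2, by simpa [hPdef] using hw.1⟩
      exact hbmax w this
    have hbw : b ≤ w := hwall b hbL hbP
    have : b = w := le_antisymm hbw hwb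
    rw [hb, this]
    rfl

-- ===== VERDICT (by name: the statement is the Claim_ definition above) =====
theorem DetermineBus_spec : Claim_equal_DetermineBus := by
  intro Schedule _ hpre
  unfold Spec_DetermineBus
  exact DetermineBus_eq_alt Schedule hpre
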